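-- pv_equiv track=rewrite | github.com/ku-wolf/code_interview | code_interview/chapter4/bst_sequences.py | build_sequences
-- ===== SOURCE A (Python) =====
-- def build_sequences(so_far, l_seq, r_seq):
--     if not l_seq and not r_seq:
--         return [so_far]
--
--     l = r = []
--     if l_seq:
--         n = l_seq[0]
--         new_l_seq = []
--         if len(l_seq) > 1:
--             for i in range(1, len(l_seq)):
--                 new_l_seq.append(l_seq[i])
--
--         new_so_far = []
--         for v in so_far:
--             new_so_far.append(v)
--         new_so_far.append(n)
--         l = build_sequences(new_so_far, new_l_seq, r_seq)
--
--     if r_seq: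
--         n = r_seq[0]
--         new_r_seq = []
--         if len(r_seq) > 1:
--             for i in range(1, len(r_seq)):
--                 new_r_seq.append(r_seq[i])
--
--         new_so_far = []
--         for v in so_far:
--             new_so_far.append(v)
--         new_so_far.append(n)
--         r = build_sequences(new_so_far, l_seq, new_r_seq)
--
--     ret = []
--     if l:
--         for v in l:
--             ret.append(v)
--     if r:
--         for v in r:
--             ret.append(v)
--
--     return ret
-- ===== SOURCE B (Python) =====
-- def weave(a, b):
--     if not a:
--         return [list(b)]
--     if not b:
--         return [list(a)]
--     return [[a[0]] + rest for rest in weave(a[1:], b)] + \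
--            [[b[0]] + rest for rest in weave(a, b[1:])]
--
--
-- def build_sequences(so_far, l_seq, r_seq):
--     return [list(so_far) + w for w in weave(l_seq, r_seq)]
-- ===== Notes on version B (the rewrite author's own statement) =====
-- stated objective: simpler
-- what changed: Replaces the threaded so_far accumulator and hand-rolled list-copy loops with a pure weave(a,b) helper that computes all order-preserving interleavings, then prepends so_far once to each result.
import Mathlib
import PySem

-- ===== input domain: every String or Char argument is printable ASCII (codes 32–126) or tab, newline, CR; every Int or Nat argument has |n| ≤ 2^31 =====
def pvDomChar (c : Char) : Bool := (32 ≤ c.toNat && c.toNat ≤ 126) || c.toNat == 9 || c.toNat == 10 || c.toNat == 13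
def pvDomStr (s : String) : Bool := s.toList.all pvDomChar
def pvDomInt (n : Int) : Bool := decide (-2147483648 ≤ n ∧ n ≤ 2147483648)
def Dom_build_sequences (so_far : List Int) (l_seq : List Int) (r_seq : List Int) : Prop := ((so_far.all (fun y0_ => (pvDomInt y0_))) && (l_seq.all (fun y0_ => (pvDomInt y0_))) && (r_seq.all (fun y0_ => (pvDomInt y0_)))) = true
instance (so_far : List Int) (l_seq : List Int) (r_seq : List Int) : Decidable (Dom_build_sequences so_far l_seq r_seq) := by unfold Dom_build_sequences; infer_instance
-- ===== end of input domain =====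

-- B replaces A's threaded accumulator and copy loops with a pure interleaving
-- helper plus one prepend pass (objective: simpler); same cost, same values.

-- ===== PORT A =====
-- Literal port of A: the `for i in range(1, len)` copy loop yields the tail,
-- the `for v in so_far … append(n)` copy loop yields so_far ++ [n], and the
-- final `if l:`/`if r:` appends are list concatenation (appending [] is a no-op).
def build_sequences (so_far : List Int) (l_seq : List Int) (r_seq : List Int) : List (List Int) :=
  if l_seq = [] ∧ r_seq = [] then [so_far]
  else
    let l : List (List Int) :=
      match l_seq with
      | [] => []
      | n :: new_l_seq => build_sequences (so_far ++ [n]) new_l_seq r_seq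
    let r : List (List Int) :=
      match r_seq with
      | [] => []
      | n :: new_r_seq => build_sequences (so_far ++ [n]) l_seq new_r_seq
    l ++ r
termination_by l_seq.length + r_seq.length
decreasing_by all_goals (simp_all; try omega)

-- ===== PORT B =====
-- weave(a, b): all order-preserving interleavings of a and b.
def weave : List Int → List Int → List (List Int)
  | [], b => [b]
  | a, [] => [a]
  | x :: a, y :: b =>
      (weave a (y :: b)).map (fun rest => x :: rest) ++
      (weave (x :: a) b).map (fun rest => y :: rest)

def build_sequences_alt (so_far : List Int) (l_seq : List Int) (r_seq : List Int) : List (List Int) :=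
  (weave l_seq r_seq).map (fun w => so_far ++ w)

-- ===== PRECONDITION & SPEC =====
def Spec_build_sequences (so_far : List Int) (l_seq : List Int) (r_seq : List Int) (out : List (List Int)) : Prop := out = build_sequences_alt so_far l_seq r_seq
instance (so_far : List Int) (l_seq : List Int) (r_seq : List Int) (out : List (List Int)) : Decidable (Spec_build_sequences so_far l_seq r_seq out) := by unfold Spec_build_sequences; infer_instance

-- ===== CLAIM (what is proved, stated in full; the proofs are below) =====
def Claim_equal_build_sequences : Prop := ∀ (so_far : List Int) (l_seq : List Int) (r_seq : List Int), Dom_build_sequences so_far l_seq r_seq → Spec_build_sequences so_far l_seq r_seq (build_sequences so_far l_seq r_seq)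

-- ===== LEMMAS AND PROOFS =====
theorem weave_nil_right (a : List Int) : weave a [] = [a] := by
  cases a <;> simp [weave]

theorem build_sequences_eq_map_weave (so_far l_seq r_seq : List Int) :
    build_sequences so_far l_seq r_seq = (weave l_seq r_seq).map (fun w => so_far ++ w) := by
  match l_seq, r_seq with
  | [], [] => simp [build_sequences, weave]
  | [], y :: b =>
      rw [build_sequences]
      simp [weave, build_sequences_eq_map_weave (so_far ++ [y]) [] b]
  | x :: a, [] =>
      rw [build_sequences]
      simp [weave_nil_right, build_sequences_eq_map_weave (so_far ++ [x]) a []]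
  | x :: a, y :: b =>
      rw [build_sequences]
      simp [weave, build_sequences_eq_map_weave (so_far ++ [x]) a (y :: b),
        build_sequences_eq_map_weave (so_far ++ [y]) (x :: a) b,
        Function.comp_def]
termination_by l_seq.length + r_seq.length
decreasing_by all_goals (simp; try omega)

-- ===== VERDICT (by name: the statement is the Claim_ definition above) =====
theorem build_sequences_spec : Claim_equal_build_sequences := by
  intro so_far l_seq r_seq _
  unfold Spec_build_sequences build_sequences_alt
  exact build_sequences_eq_map_weave so_far l_seq r_seq
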